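-- pv_equiv track=rewrite | github.com/bobbysusantoali1/AOL_Project_Machine_Learning | .ipynb_checkpoints/Frontend-checkpoint.py | split_thousands
-- ===== SOURCE A (Python) =====
-- def split_thousands(n):
-- 	result = ""
-- 	while(n > 1000):
-- 		result = str(int(n % 1000)).zfill(3) + result
-- 		n //= 1000
-- 		if n > 0:
-- 			result = "." + result
-- 	if n > 0:
-- 		result = str(n) + result
--
-- 	return result
-- ===== SOURCE B (Python) =====
-- def split_thousands(n):
-- 	if n > 1000:
-- 		return split_thousands(n // 1000) + "." + str(int(n % 1000)).zfill(3)
-- 	elif n > 0: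
-- 		return str(n)
-- 	else:
-- 		return ""
-- ===== Notes on version B (the rewrite author's own statement) =====
-- stated objective: simpler
-- what changed: Replaced the accumulating while-loop (prepending groups into a result string with an in-loop separator branch) by a top-down recursion on the magnitude that builds the leading part first and appends the zero-padded last group.
import Mathlib
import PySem

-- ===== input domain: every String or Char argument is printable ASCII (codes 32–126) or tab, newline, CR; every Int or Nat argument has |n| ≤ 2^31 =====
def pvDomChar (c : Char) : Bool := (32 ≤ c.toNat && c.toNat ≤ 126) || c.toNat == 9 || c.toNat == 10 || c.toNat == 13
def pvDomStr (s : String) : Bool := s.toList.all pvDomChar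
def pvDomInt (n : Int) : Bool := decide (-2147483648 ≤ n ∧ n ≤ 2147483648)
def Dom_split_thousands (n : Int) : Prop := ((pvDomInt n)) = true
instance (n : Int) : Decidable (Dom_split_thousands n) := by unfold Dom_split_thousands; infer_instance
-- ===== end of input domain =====

-- B replaces A's accumulating while-loop by a top-down recursion on the magnitude (objective: simpler).

-- ===== PORT A =====
-- literal port of A's while-loop: state (n, result), loop while n > 1000
def split_thousands_loop (n : Int) (result : String) : String :=
  if _h : n > 1000 then
    let result := PySem.Str.zfill (PySem.Int.toStr (PySem.Int.mod n 1000)) 3 ++ result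
    let n' := PySem.Int.floordiv n 1000
    let result := if n' > 0 then "." ++ result else result
    split_thousands_loop n' result
  else
    if n > 0 then PySem.Int.toStr n ++ result else result
termination_by n.toNat
decreasing_by
  have h1 : PySem.Int.floordiv n 1000 = n / 1000 := PySem.Int.floordiv_eq_ediv_of_pos (by omega)
  simp only [h1]
  omega

def split_thousands (n : Int) : String := split_thousands_loop n ""

-- ===== PORT B =====
def split_thousands_alt (n : Int) : String :=
  if _h : n > 1000 then
    split_thousands_alt (PySem.Int.floordiv n 1000) ++ "." ++
      PySem.Str.zfill (PySem.Int.toStr (PySem.Int.mod n 1000)) 3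
  else if n > 0 then PySem.Int.toStr n
  else ""
termination_by n.toNat
decreasing_by
  have h1 : PySem.Int.floordiv n 1000 = n / 1000 := PySem.Int.floordiv_eq_ediv_of_pos (by omega)
  simp only [h1]
  omega

-- ===== PRECONDITION & SPEC =====
def Spec_split_thousands (n : Int) (out : String) : Prop := out = split_thousands_alt n
instance (n : Int) (out : String) : Decidable (Spec_split_thousands n out) := by unfold Spec_split_thousands; infer_instance

-- ===== CLAIM (what is proved, stated in full; the proofs are below) =====
def Claim_equal_split_thousands : Prop := ∀ (n : Int), Dom_split_thousands n → Spec_split_thousands n (split_thousands n)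

-- ===== LEMMAS AND PROOFS =====

theorem loop_eq_alt_append (n : Int) (result : String) :
    split_thousands_loop n result = split_thousands_alt n ++ result := by
  induction n, result using split_thousands_loop.induct with
  | case1 n result h z n' r2 ih =>
    have hpos : PySem.Int.floordiv n 1000 > 0 := by
      rw [PySem.Int.floordiv_eq_ediv_of_pos (by omega)]; omega
    simp only [z, n', r2] at ih
    simp only [dif_pos hpos] at ih
    rw [split_thousands_loop, split_thousands_alt]
    simp only [dif_pos h, if_pos hpos]
    rw [ih, String.append_assoc, String.append_assoc]
  | case2 n result h h2 =>
    rw [split_thousands_loop, split_thousands_alt]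
    simp only [dif_neg h, if_pos h2]
  | case3 n result h h2 =>
    rw [split_thousands_loop, split_thousands_alt]
    simp [dif_neg h, if_neg h2]

-- ===== VERDICT (by name: the statement is the Claim_ definition above) =====
theorem split_thousands_spec : Claim_equal_split_thousands := by
  intro n _
  unfold Spec_split_thousands split_thousands
  rw [loop_eq_alt_append]
  simp
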